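-- pv_equiv track=rewrite | github.com/bibleman-stan/readers-gnt | scripts/sweep_r19_genabs.py | word_positions
-- ===== SOURCE A (Python) =====
-- def word_positions(line_text):
--     """Return list of (raw_word, start_index, end_index_exclusive) in original spacing."""
--     out = []
--     i = 0
--     n = len(line_text)
--     while i < n:
--         while i < n and line_text[i].isspace():
--             i += 1
--         if i >= n: break
--         start = i
--         while i < n and not line_text[i].isspace():
--             i += 1
--         out.append((line_text[start:i], start, i))
--     return out
-- ===== SOURCE B (Python) =====
-- def word_positions(line_text):
--     """Return list of (raw_word, start_index, end_index_exclusive) in original spacing."""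
--     out = []
--     start = None
--     n = len(line_text)
--     for i, ch in enumerate(line_text):
--         if ch.isspace():
--             if start is not None:
--                 out.append((line_text[start:i], start, i))
--                 start = None
--         else:
--             if start is None:
--                 start = i
--     if start is not None:
--         out.append((line_text[start:n], start, n))
--     return out
-- ===== Notes on version B (the rewrite author's own statement) =====
-- stated objective: simpler
-- what changed: Replaces A's nested while-loops (outer loop with two inner index-advancing scans per word) by one flat for-loop over enumerate(line_text) that carries a single optional word-start index and flushes a trailing word after the loop.
import Mathlib
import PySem

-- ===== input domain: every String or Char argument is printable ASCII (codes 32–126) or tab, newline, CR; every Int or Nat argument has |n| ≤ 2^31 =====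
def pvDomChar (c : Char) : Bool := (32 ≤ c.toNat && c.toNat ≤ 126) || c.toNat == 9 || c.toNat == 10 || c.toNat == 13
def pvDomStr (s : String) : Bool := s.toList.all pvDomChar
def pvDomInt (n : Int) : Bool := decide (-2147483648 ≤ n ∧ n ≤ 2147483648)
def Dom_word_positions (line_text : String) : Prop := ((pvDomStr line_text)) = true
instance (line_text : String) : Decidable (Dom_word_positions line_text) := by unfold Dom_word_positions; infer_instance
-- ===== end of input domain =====

-- B replaces A's nested while-loops by one flat pass carrying an optional word-start index; same O(n) cost, simpler shape.

-- ===== PORT A =====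
-- inner loop 'while i < n and line_text[i].isspace(): i += 1'
-- (cs.getD i ' ' is exact for line_text[i]: the loop guard ensures i < n = len;
--  the fuel argument is only a totality guard — every call supplies fuel ≥ n - i,
--  enough for the loop to reach its Python exit condition)
def wpSkipWs (cs : List Char) (n : Nat) : Nat → Nat → Nat
  | 0, i => i
  | f + 1, i =>
    if i < n ∧ PySem.Chars.isspace (cs.getD i ' ') = true then wpSkipWs cs n f (i + 1) else i

-- inner loop 'while i < n and not line_text[i].isspace(): i += 1'
def wpSkipWord (cs : List Char) (n : Nat) : Nat → Nat → Nat
  | 0, i => i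
  | f + 1, i =>
    if i < n ∧ ¬ PySem.Chars.isspace (cs.getD i ' ') = true then wpSkipWord cs n f (i + 1) else i

-- outer 'while i < n: …' loop of A (fuel n: i strictly increases each iteration)
def wpLoopA (line_text : String) (cs : List Char) (n : Nat) : Nat → Nat → List (String × Int × Int)
  | 0, _ => []
  | f + 1, i =>
    if i < n then
      let i1 := wpSkipWs cs n n i
      if n ≤ i1 then []
      else
        let i2 := wpSkipWord cs n n i1
        (PySem.Str.slice line_text (some (i1 : Int)) (some (i2 : Int)), (i1 : Int), (i2 : Int)) ::
          wpLoopA line_text cs n f i2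
    else []

def word_positions (line_text : String) : List (String × Int × Int) :=
  wpLoopA line_text line_text.toList line_text.toList.length line_text.toList.length 0

-- ===== PORT B =====
-- body of B's for-loop: state = (out, start)
def wpStep (line_text : String) (st : List (String × Int × Int) × Option Int) (p : Int × Char) :
    List (String × Int × Int) × Option Int :=
  if PySem.Chars.isspace p.2 = true then
    match st.2 with
    | some s => (st.1 ++ [(PySem.Str.slice line_text (some s) (some p.1), s, p.1)], none)
    | none => st
  else
    match st.2 with
    | none => (st.1, some p.1)
    | some _ => st

-- B's trailing flush 'if start is not None: out.append((line_text[start:n], start, n))'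
def wpFin (line_text : String) (n : Nat) (st : List (String × Int × Int) × Option Int) :
    List (String × Int × Int) :=
  match st.2 with
  | some s => st.1 ++ [(PySem.Str.slice line_text (some s) (some (n : Int)), s, (n : Int))]
  | none => st.1

def word_positions_alt (line_text : String) : List (String × Int × Int) :=
  wpFin line_text line_text.toList.length
    ((PySem.List.enumerate line_text.toList 0).foldl (wpStep line_text) ([], none))

-- ===== PRECONDITION & SPEC =====
def Spec_word_positions (line_text : String) (out : List (String × Int × Int)) : Prop := out = word_positions_alt line_text
instance (line_text : String) (out : List (String × Int × Int)) : Decidable (Spec_word_positions line_text out) := by unfold Spec_word_positions; infer_instance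

-- ===== CLAIM (what is proved, stated in full; the proofs are below) =====
def Claim_equal_word_positions : Prop := ∀ (line_text : String), Dom_word_positions line_text → Spec_word_positions line_text (word_positions line_text)

-- ===== LEMMAS AND PROOFS =====

theorem wpSkipWs_le (cs : List Char) (n : Nat) : ∀ (f i : Nat), i ≤ wpSkipWs cs n f i := by
  intro f
  induction f with
  | zero => intro i; simp [wpSkipWs]
  | succ f ih =>
    intro i
    rw [wpSkipWs]
    split
    · exact Nat.le_trans (Nat.le_succ i) (ih (i + 1))
    · exact Nat.le_refl i

theorem wpSkipWord_le (cs : List Char) (n : Nat) : ∀ (f i : Nat), i ≤ wpSkipWord cs n f i := by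
  intro f
  induction f with
  | zero => intro i; simp [wpSkipWord]
  | succ f ih =>
    intro i
    rw [wpSkipWord]
    split
    · exact Nat.le_trans (Nat.le_succ i) (ih (i + 1))
    · exact Nat.le_refl i

theorem wpSkipWs_stay (cs : List Char) (n i : Nat)
    (h : ¬ (i < n ∧ PySem.Chars.isspace (cs.getD i ' ') = true)) :
    ∀ f, wpSkipWs cs n f i = i := by
  intro f
  cases f with
  | zero => rw [wpSkipWs]
  | succ f => rw [wpSkipWs, if_neg h]

theorem wpSkipWs_fuel (cs : List Char) (n : Nat) :
    ∀ f f' i, n ≤ f + i → n ≤ f' + i → wpSkipWs cs n f i = wpSkipWs cs n f' i := by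
  intro f
  induction f with
  | zero =>
    intro f' i hf hf'
    rw [wpSkipWs, wpSkipWs_stay cs n i (fun hcon => by omega) f']
  | succ f ih =>
    intro f' i hf hf'
    by_cases hc : i < n ∧ PySem.Chars.isspace (cs.getD i ' ') = true
    · cases f' with
      | zero => have := hc.1; omega
      | succ f' =>
        rw [wpSkipWs, wpSkipWs, if_pos hc, if_pos hc]
        exact ih f' (i + 1) (by omega) (by omega)
    · rw [wpSkipWs_stay cs n i hc, wpSkipWs_stay cs n i hc]

theorem wpSkipWs_stop (cs : List Char) (n : Nat) :
    ∀ (f i : Nat), n ≤ f + i → wpSkipWs cs n f i < n →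
      PySem.Chars.isspace (cs.getD (wpSkipWs cs n f i) ' ') = false := by
  intro f
  induction f with
  | zero =>
    intro i hf h
    rw [wpSkipWs] at h
    omega
  | succ f ih =>
    intro i hf h
    rw [wpSkipWs] at h ⊢
    by_cases hc : i < n ∧ PySem.Chars.isspace (cs.getD i ' ') = true
    · rw [if_pos hc] at h ⊢
      exact ih (i + 1) (by omega) h
    · rw [if_neg hc] at h ⊢
      simp only [not_and, Bool.not_eq_true] at hc
      exact hc h

theorem wpSkipWord_lt (cs : List Char) (n f i : Nat) (hf : 0 < f) (h1 : i < n)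
    (h2 : PySem.Chars.isspace (cs.getD i ' ') = false) : i < wpSkipWord cs n f i := by
  cases f with
  | zero => omega
  | succ f =>
    rw [wpSkipWord, if_pos ⟨h1, by simp only [h2]; exact Bool.false_ne_true⟩]
    exact Nat.lt_of_lt_of_le (Nat.lt_succ_self i) (wpSkipWord_le cs n f (i + 1))

theorem wpSkipWs_step (cs : List Char) (n f i : Nat) (h1 : i < n)
    (h2 : PySem.Chars.isspace (cs.getD i ' ') = true) :
    wpSkipWs cs n (f + 1) i = wpSkipWs cs n f (i + 1) := by
  rw [wpSkipWs, if_pos ⟨h1, h2⟩]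

-- wpSkipWord (with enough fuel) lands on the first stopping index t reached from s
-- through non-space characters
theorem wpSkipWord_eq (cs : List Char) (n t : Nat) (ht : t ≤ n)
    (hstop : t = n ∨ PySem.Chars.isspace (cs.getD t ' ') = true) :
    ∀ f s, t ≤ f + s → s ≤ t →
      (∀ j, s ≤ j → j < t → PySem.Chars.isspace (cs.getD j ' ') = false) →
      wpSkipWord cs n f s = t := by
  intro f
  induction f with
  | zero =>
    intro s hf hs _
    have hst : s = t := by omega
    subst hst
    rw [wpSkipWord]
  | succ f ih =>
    intro s hf hs hns
    by_cases hst : s = t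
    · subst hst
      rcases hstop with h | h
      · rw [wpSkipWord, if_neg (fun hcon => by omega)]
      · rw [wpSkipWord, if_neg (fun hcon => hcon.2 h)]
    · have hslt : s < t := by omega
      rw [wpSkipWord,
        if_pos ⟨by omega, by simp only [hns s le_rfl hslt]; exact Bool.false_ne_true⟩]
      exact ih (s + 1) (by omega) (by omega) (fun j hj1 hj2 => hns j (by omega) hj2)

theorem wpLoopA_nil (line_text : String) (cs : List Char) (n i : Nat) (h : n ≤ i) :
    ∀ f, wpLoopA line_text cs n f i = [] := by
  intro f
  cases f with
  | zero => rw [wpLoopA]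
  | succ f => rw [wpLoopA, if_neg (by omega)]

-- the result does not depend on the fuel once the fuel covers the remaining distance
theorem wpLoopA_fuel (line_text : String) (cs : List Char) (n : Nat) :
    ∀ f f' i, n ≤ f + i → n ≤ f' + i →
      wpLoopA line_text cs n f i = wpLoopA line_text cs n f' i := by
  intro f
  induction f with
  | zero =>
    intro f' i hf hf'
    rw [wpLoopA, wpLoopA_nil line_text cs n i (by omega) f']
  | succ f ih =>
    intro f' i hf hf'
    by_cases hi : i < n
    · cases f' with
      | zero => omega
      | succ f' =>
        rw [wpLoopA, wpLoopA, if_pos hi, if_pos hi]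
        by_cases h2 : n ≤ wpSkipWs cs n n i
        · rw [if_pos h2, if_pos h2]
        · rw [if_neg h2, if_neg h2]
          have hlt : i < wpSkipWord cs n n (wpSkipWs cs n n i) :=
            Nat.lt_of_le_of_lt (wpSkipWs_le cs n n i)
              (wpSkipWord_lt cs n n _ (by omega) (by omega)
                (wpSkipWs_stop cs n n i (by omega) (by omega)))
          dsimp only
          rw [ih f' (wpSkipWord cs n n (wpSkipWs cs n n i)) (by omega) (by omega)]
    · rw [wpLoopA_nil line_text cs n i (by omega), wpLoopA_nil line_text cs n i (by omega)]

theorem wpLoopA_space (line_text : String) (cs : List Char) (n i : Nat) (h1 : i < n)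
    (h2 : PySem.Chars.isspace (cs.getD i ' ') = true) :
    wpLoopA line_text cs n n i = wpLoopA line_text cs n n (i + 1) := by
  cases hn : n with
  | zero => omega
  | succ m =>
    subst hn
    have hws : wpSkipWs cs (m + 1) (m + 1) i = wpSkipWs cs (m + 1) (m + 1) (i + 1) := by
      rw [wpSkipWs_step cs (m + 1) m i h1 h2]
      exact wpSkipWs_fuel cs (m + 1) m (m + 1) (i + 1) (by omega) (by omega)
    by_cases h3 : i + 1 < m + 1
    · rw [wpLoopA, wpLoopA, if_pos h1, if_pos h3, hws]
    · have hskip : wpSkipWs cs (m + 1) (m + 1) (i + 1) = i + 1 :=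
        wpSkipWs_stay cs (m + 1) (i + 1) (fun hcon => by omega) (m + 1)
      rw [wpLoopA, wpLoopA, if_pos h1, if_neg h3, hws, hskip, if_pos (by omega)]

theorem wpLoopA_word (line_text : String) (cs : List Char) (n i : Nat) (h1 : i < n)
    (h2 : PySem.Chars.isspace (cs.getD i ' ') = false) :
    wpLoopA line_text cs n n i =
      (PySem.Str.slice line_text (some (i : Int)) (some ((wpSkipWord cs n n i : Nat) : Int)),
        (i : Int), ((wpSkipWord cs n n i : Nat) : Int)) ::
        wpLoopA line_text cs n n (wpSkipWord cs n n i) := by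
  have hlt : i < wpSkipWord cs n n i := wpSkipWord_lt cs n n i (by omega) h1 h2
  cases hn : n with
  | zero => omega
  | succ m =>
    subst hn
    rw [wpLoopA, if_pos h1,
      wpSkipWs_stay cs (m + 1) i
        (fun hcon => Bool.false_ne_true ((h2 ▸ hcon.2 : (false : Bool) = true))) (m + 1),
      if_neg (by omega)]
    dsimp only
    rw [wpLoopA_fuel line_text cs (m + 1) m (m + 1) (wpSkipWord cs (m + 1) (m + 1) i)
      (by omega) (by omega)]

-- the central invariant: B's remaining fold from index i equals A's outer loop from i
theorem wpKey (line_text : String) :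
    ∀ (k i : Nat), line_text.toList.length - i = k →
      ((∀ acc, wpFin line_text line_text.toList.length
            ((PySem.List.enumerate (line_text.toList.drop i) (i : Int)).foldl
              (wpStep line_text) (acc, none))
          = acc ++ wpLoopA line_text line_text.toList line_text.toList.length
              line_text.toList.length i)
       ∧ (∀ acc (s : Nat), s ≤ i → s ≤ line_text.toList.length →
            (∀ j, s ≤ j → j < i →
              PySem.Chars.isspace (line_text.toList.getD j ' ') = false) →
            wpFin line_text line_text.toList.length
              ((PySem.List.enumerate (line_text.toList.drop i) (i : Int)).foldl
                (wpStep line_text) (acc, some (s : Int)))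
            = acc ++
              (PySem.Str.slice line_text (some (s : Int))
                  (some ((wpSkipWord line_text.toList line_text.toList.length
                    line_text.toList.length s : Nat) : Int)),
                (s : Int),
                ((wpSkipWord line_text.toList line_text.toList.length
                  line_text.toList.length s : Nat) : Int)) ::
                wpLoopA line_text line_text.toList line_text.toList.length
                  line_text.toList.length
                  (wpSkipWord line_text.toList line_text.toList.length
                    line_text.toList.length s))) := by
  intro k
  induction k with
  | zero =>
    intro i hk
    have hni : line_text.toList.length ≤ i := by omega
    have hdrop : line_text.toList.drop i = [] := List.drop_eq_nil_of_le hni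
    rw [hdrop]
    constructor
    · intro acc
      simp only [PySem.List.enumerate_nil, List.foldl_nil, wpFin,
        wpLoopA_nil line_text _ _ i hni, List.append_nil]
    · intro acc s hs hsn hns
      have he : wpSkipWord line_text.toList line_text.toList.length
          line_text.toList.length s = line_text.toList.length :=
        wpSkipWord_eq line_text.toList line_text.toList.length line_text.toList.length
          le_rfl (Or.inl rfl) line_text.toList.length s (by omega) hsn
          (fun j hj1 hj2 => hns j hj1 (by omega))
      simp only [PySem.List.enumerate_nil, List.foldl_nil, wpFin, he,
        wpLoopA_nil line_text _ _ _ le_rfl]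
  | succ k ih =>
    intro i hk
    have hi : i < line_text.toList.length := by omega
    have hdrop : line_text.toList.drop i =
        line_text.toList[i] :: line_text.toList.drop (i + 1) :=
      List.drop_eq_getElem_cons hi
    have hgetD : line_text.toList.getD i ' ' = line_text.toList[i] :=
      List.getD_eq_getElem _ _ hi
    have hcast : (i : Int) + 1 = ((i + 1 : Nat) : Int) := by push_cast; ring
    obtain ⟨ih1, ih2⟩ := ih (i + 1) (by omega)
    rw [hdrop]
    constructor
    · intro acc
      rw [PySem.List.enumerate_cons, List.foldl_cons, hcast]
      by_cases hsp : PySem.Chars.isspace line_text.toList[i] = true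
      · -- whitespace, no word open: state unchanged, A skips the char too
        have hstep : wpStep line_text (acc, none) ((i : Int), line_text.toList[i]) =
            (acc, none) := by simp [wpStep, hsp]
        rw [hstep, ih1 acc,
          wpLoopA_space line_text _ _ i hi (by rw [hgetD]; exact hsp)]
      · -- non-space, no word open: open a word at i
        have hstep : wpStep line_text (acc, none) ((i : Int), line_text.toList[i]) =
            (acc, some (i : Int)) := by simp [wpStep, hsp]
        rw [hstep, ih2 acc i (by omega) (by omega)
          (fun j hj1 hj2 => by
            have hji : j = i := by omega
            subst hji
            rw [hgetD]
            simpa using hsp),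
          ← wpLoopA_word line_text _ _ i hi (by rw [hgetD]; simpa using hsp)]
    · intro acc s hs hsn hns
      rw [PySem.List.enumerate_cons, List.foldl_cons, hcast]
      by_cases hsp : PySem.Chars.isspace line_text.toList[i] = true
      · -- whitespace closes the open word [s, i)
        have hstep : wpStep line_text (acc, some (s : Int)) ((i : Int), line_text.toList[i]) =
            (acc ++ [(PySem.Str.slice line_text (some (s : Int)) (some (i : Int)),
              (s : Int), (i : Int))], none) := by simp [wpStep, hsp]
        have he : wpSkipWord line_text.toList line_text.toList.length
            line_text.toList.length s = i :=
          wpSkipWord_eq line_text.toList line_text.toList.length i (by omega)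
            (Or.inr (by rw [hgetD]; exact hsp)) line_text.toList.length s (by omega) hs hns
        rw [hstep, ih1 _, he,
          wpLoopA_space line_text _ _ i hi (by rw [hgetD]; exact hsp)]
        simp
      · -- non-space extends the open word
        have hstep : wpStep line_text (acc, some (s : Int)) ((i : Int), line_text.toList[i]) =
            (acc, some (s : Int)) := by simp [wpStep, hsp]
        rw [hstep, ih2 acc s (by omega) hsn
          (fun j hj1 hj2 => by
            rcases Nat.lt_or_ge j i with hj | hj
            · exact hns j hj1 hj
            · have : j = i := by omega
              subst this
              rw [hgetD]; simpa using hsp)]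

-- ===== VERDICT (by name: the statement is the Claim_ definition above) =====
theorem word_positions_spec : Claim_equal_word_positions := by
  intro line_text _
  unfold Spec_word_positions word_positions word_positions_alt
  have h := (wpKey line_text (line_text.toList.length - 0) 0 rfl).1 []
  simp only [List.drop_zero, Nat.cast_zero, List.nil_append] at h
  exact h.symm
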